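-- pv_equiv track=rewrite | github.com/ytw25/articraft | data/records/rec_task-generate-a-3d-assembly-model-of-a-standard-_20260328_184227_091339_f96df2db/model.py | _nonzero_faces
-- ===== SOURCE A (Python) =====
-- FACE_TO_COORDS: dict[str, tuple[int, int, int]] = {
--     "u": (0, 0, 1),
--     "d": (0, 0, -1),
--     "f": (0, 1, 0),
--     "b": (0, -1, 0),
--     "r": (1, 0, 0),
--     "l": (-1, 0, 0),
-- }
--
-- def _nonzero_faces(coords: tuple[int, int, int]) -> list[str]:
--     faces: list[str] = []
--     for face, face_coords in FACE_TO_COORDS.items():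
--         for coord, face_coord in zip(coords, face_coords):
--             if face_coord != 0 and coord == face_coord:
--                 faces.append(face)
--                 break
--     return faces
-- ===== SOURCE B (Python) =====
-- def _nonzero_faces(coords):
--     faces = []
--     for axis, pos, neg in ((2, "u", "d"), (1, "f", "b"), (0, "r", "l")):
--         c = coords[axis]
--         if c == 1:
--             faces.append(pos)
--         elif c == -1:
--             faces.append(neg)
--     return faces
-- ===== Notes on version B (the rewrite author's own statement) =====
-- stated objective: simpler
-- what changed: B loops once over the three coordinate axes with a fixed axis-to-face table instead of scanning the face dictionary with an inner zip/break per face.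
import Mathlib
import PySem

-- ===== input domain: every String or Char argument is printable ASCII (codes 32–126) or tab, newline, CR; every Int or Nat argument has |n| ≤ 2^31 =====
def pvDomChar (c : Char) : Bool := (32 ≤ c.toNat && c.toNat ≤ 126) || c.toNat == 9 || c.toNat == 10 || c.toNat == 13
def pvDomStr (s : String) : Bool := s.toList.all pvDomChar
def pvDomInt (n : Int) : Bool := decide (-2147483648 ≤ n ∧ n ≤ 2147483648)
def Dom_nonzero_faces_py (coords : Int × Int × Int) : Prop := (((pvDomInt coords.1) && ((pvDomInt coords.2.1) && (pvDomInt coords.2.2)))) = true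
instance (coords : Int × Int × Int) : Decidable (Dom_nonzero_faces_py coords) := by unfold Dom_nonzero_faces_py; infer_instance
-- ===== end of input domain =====

-- B replaces A's scan of the six-entry face dictionary (with an inner zip/break per face)
-- by one flat loop over the three coordinate axes with a fixed axis→(pos,neg) face table; objective: simpler.

-- ===== PORT A =====
-- FACE_TO_COORDS as an association list in insertion order
def pvFaceToCoords : List (String × (Int × Int × Int)) :=
  [("u", (0, 0, 1)), ("d", (0, 0, -1)), ("f", (0, 1, 0)),
   ("b", (0, -1, 0)), ("r", (1, 0, 0)), ("l", (-1, 0, 0))]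

-- the inner 'for … in zip(coords, face_coords): if …: append; break' loop:
-- returns true exactly when the append (and break) fires
def pvInnerLoop : List (Int × Int) → Bool
  | [] => false
  | (c, fc) :: rest => if fc ≠ 0 ∧ c = fc then true else pvInnerLoop rest

def nonzero_faces_py (coords : Int × Int × Int) : List String :=
  pvFaceToCoords.foldl
    (fun faces p =>
      if pvInnerLoop [(coords.1, p.2.1), (coords.2.1, p.2.2.1), (coords.2.2, p.2.2.2)]
      then faces ++ [p.1] else faces) []

-- ===== PORT B =====
def pvAxes : List (Nat × String × String) := [(2, "u", "d"), (1, "f", "b"), (0, "r", "l")]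

def nonzero_faces_py_alt (coords : Int × Int × Int) : List String :=
  pvAxes.foldl
    (fun faces t =>
      let c : Int := match t.1 with
        | 0 => coords.1
        | 1 => coords.2.1
        | _ => coords.2.2
      if c = 1 then faces ++ [t.2.1]
      else if c = -1 then faces ++ [t.2.2]
      else faces) []

-- ===== PRECONDITION & SPEC =====
def Spec_nonzero_faces_py (coords : Int × Int × Int) (out : List String) : Prop := out = nonzero_faces_py_alt coords
instance (coords : Int × Int × Int) (out : List String) : Decidable (Spec_nonzero_faces_py coords out) := by unfold Spec_nonzero_faces_py; infer_instance

-- ===== CLAIM (what is proved, stated in full; the proofs are below) =====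
def Claim_equal_nonzero_faces_py : Prop := ∀ (coords : Int × Int × Int), Dom_nonzero_faces_py coords → Spec_nonzero_faces_py coords (nonzero_faces_py coords)

-- ===== LEMMAS AND PROOFS =====

-- the inner zip/break loop for each of the six faces, reduced to a single test
lemma pvInner_u (x y z : Int) : pvInnerLoop [(x,0),(y,0),(z,1)] = decide (z = 1) := by
  simp [pvInnerLoop]
lemma pvInner_d (x y z : Int) : pvInnerLoop [(x,0),(y,0),(z,-1)] = decide (z = -1) := by
  simp [pvInnerLoop]
lemma pvInner_f (x y z : Int) : pvInnerLoop [(x,0),(y,1),(z,0)] = decide (y = 1) := by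
  simp [pvInnerLoop]
lemma pvInner_b (x y z : Int) : pvInnerLoop [(x,0),(y,-1),(z,0)] = decide (y = -1) := by
  simp [pvInnerLoop]
lemma pvInner_r (x y z : Int) : pvInnerLoop [(x,1),(y,0),(z,0)] = decide (x = 1) := by
  simp [pvInnerLoop]
lemma pvInner_l (x y z : Int) : pvInnerLoop [(x,-1),(y,0),(z,0)] = decide (x = -1) := by
  simp [pvInnerLoop]

-- a common canonical form both ports reduce to
def pvCanon (x y z : Int) : List String :=
  ((((((if z = 1 then ["u"] else []) ++ (if z = -1 then ["d"] else []))
    ++ (if y = 1 then ["f"] else [])) ++ (if y = -1 then ["b"] else []))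
    ++ (if x = 1 then ["r"] else [])) ++ (if x = -1 then ["l"] else []))

lemma A_canon (x y z : Int) : nonzero_faces_py (x, y, z) = pvCanon x y z := by
  unfold nonzero_faces_py pvFaceToCoords pvCanon
  simp only [List.foldl, pvInner_u, pvInner_d, pvInner_f, pvInner_b, pvInner_r, pvInner_l,
    decide_eq_true_eq]
  split_ifs <;> rfl

lemma B_canon (x y z : Int) : nonzero_faces_py_alt (x, y, z) = pvCanon x y z := by
  unfold nonzero_faces_py_alt pvAxes pvCanon
  simp only [List.foldl]
  split_ifs <;> first | rfl | (exfalso; omega)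

-- ===== VERDICT (by name: the statement is the Claim_ definition above) =====
theorem nonzero_faces_py_spec : Claim_equal_nonzero_faces_py := by
  intro ⟨x, y, z⟩ _
  unfold Spec_nonzero_faces_py
  rw [A_canon, B_canon]
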